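-- pv_equiv track=rewrite | github.com/aasthamuskan/my-python-practice | REAPPERA PYQ/question44.py | calculate_sum_and_multiplication
-- ===== SOURCE A (Python) =====
-- def calculate_sum_and_multiplication(number):
--     if number < 0 or len(str(number)) < 2:
--         return "Invalid input"
--
--     digits = [int(digit) for digit in str(number)]
--     digit_sum = 0
--     digit_mul = 1
--
--     for index, digit in enumerate(digits):
--         if (index + 1) % 2 == 0:
--             digit_mul *= digit
--         else:
--             digit_sum += digit
--
--     return digit_sum, digit_mul
-- ===== SOURCE B (Python) =====
-- def _pairs(ds):
--     # fold the digit list back-to-front, consuming two digits at a time: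
--     # first of each pair is summed, second is multiplied
--     if not ds:
--         return (0, 1)
--     if len(ds) == 1:
--         return (ds[0], 1)
--     s, m = _pairs(ds[2:])
--     return (ds[0] + s, ds[1] * m)
--
--
-- def calculate_sum_and_multiplication(number):
--     if number < 0 or len(str(number)) < 2:
--         return "Invalid input"
--     return _pairs([int(d) for d in str(number)])
-- ===== Notes on version B (the rewrite author's own statement) =====
-- stated objective: alternative
-- what changed: Replaces the single indexed loop with an enumerate/parity branch by a pairwise recursion that consumes two digits at a time and builds the (sum, product) pair back-to-front.
-- outside the precondition, e.g. on calculate_sum_and_multiplication(5): A returns 'Invalid input', B returns 'Invalid input'; on calculate_sum_and_multiplication(-3): A returns 'Invalid input', B returns 'Invalid input'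
import Mathlib
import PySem

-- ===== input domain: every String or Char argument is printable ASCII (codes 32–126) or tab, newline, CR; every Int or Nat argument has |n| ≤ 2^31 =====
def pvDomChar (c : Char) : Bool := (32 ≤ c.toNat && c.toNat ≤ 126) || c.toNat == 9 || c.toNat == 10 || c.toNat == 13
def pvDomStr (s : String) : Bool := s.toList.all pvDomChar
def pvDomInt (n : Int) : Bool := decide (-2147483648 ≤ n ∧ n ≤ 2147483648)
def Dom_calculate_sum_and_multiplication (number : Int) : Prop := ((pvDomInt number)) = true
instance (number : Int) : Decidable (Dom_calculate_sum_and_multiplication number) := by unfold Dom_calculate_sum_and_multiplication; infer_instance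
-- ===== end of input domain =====

-- B replaces A's indexed loop with a parity branch by a pairwise back-to-front recursion; same cost, different decomposition.
-- Where A returns the string "Invalid input" (number < 0 or a single digit) nothing of type Int × Int exists; Pre_ excludes those inputs.

-- ===== PORT A =====
def calculate_sum_and_multiplication (number : Int) : Int × Int :=
  if number < 0 ∨ PySem.Str.len (PySem.Int.toStr number) < 2 then (0, 0)  -- Python returns "Invalid input" here; excluded by Pre_
  else
    -- int(digit) ported as code-point arithmetic: exact on the digit characters str(number) consists of
    let digits := (PySem.Int.toStr number).toList.map (fun c => ((c.toNat : Int) - 48))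
    (PySem.List.enumerate digits 0).foldl
      (fun st p =>
        if PySem.Int.mod (p.1 + 1) 2 == 0 then (st.1, st.2 * p.2)
        else (st.1 + p.2, st.2))
      (0, 1)

-- ===== PORT B =====
-- _pairs: consume two digits at a time, back-to-front
def pvPairs : List Int → Int × Int
  | [] => (0, 1)
  | [d] => (d, 1)
  | d1 :: d2 :: rest =>
      let (s, m) := pvPairs rest
      (d1 + s, d2 * m)

def calculate_sum_and_multiplication_alt (number : Int) : Int × Int :=
  if number < 0 ∨ PySem.Str.len (PySem.Int.toStr number) < 2 then (0, 0)  -- "Invalid input" in Python; excluded by Pre_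
  else
    pvPairs ((PySem.Int.toStr number).toList.map (fun c => ((c.toNat : Int) - 48)))

-- ===== PRECONDITION & SPEC =====
-- Pre_ excludes exactly the inputs (number < 0 or a single digit, i.e. number < 10) on which
-- A returns the string "Invalid input" — not a value of type Int × Int.
def Pre_calculate_sum_and_multiplication (number : Int) : Prop := 10 ≤ number
instance (number : Int) : Decidable (Pre_calculate_sum_and_multiplication number) := by
  unfold Pre_calculate_sum_and_multiplication; infer_instance

def pvWitness_calculate_sum_and_multiplication : Int := 1234

def Spec_calculate_sum_and_multiplication (number : Int) (out : Int × Int) : Prop :=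
  out = calculate_sum_and_multiplication_alt number
instance (number : Int) (out : Int × Int) : Decidable (Spec_calculate_sum_and_multiplication number out) := by
  unfold Spec_calculate_sum_and_multiplication; infer_instance

-- ===== CLAIM (what is proved, stated in full; the proofs are below) =====
def Claim_equal_calculate_sum_and_multiplication : Prop :=
  ∀ (number : Int), Dom_calculate_sum_and_multiplication number →
    Pre_calculate_sum_and_multiplication number →
    Spec_calculate_sum_and_multiplication number (calculate_sum_and_multiplication number)

-- ===== LEMMAS AND PROOFS =====

-- A's enumerate/parity fold, started at an even index, computes exactly B's pairwise recursion.
lemma pv_fold_eq_pairs (ds : List Int) :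
    ∀ (k : Int) (s m : Int), k % 2 = 0 →
      (PySem.List.enumerate ds k).foldl
        (fun st p =>
          if PySem.Int.mod (p.1 + 1) 2 == 0 then (st.1, st.2 * p.2)
          else (st.1 + p.2, st.2))
        (s, m) = (s + (pvPairs ds).1, m * (pvPairs ds).2) := by
  induction ds using pvPairs.induct with
  | case1 =>
      intro k s m hk
      simp [PySem.List.enumerate, pvPairs]
  | case2 d =>
      intro k s m hk
      have h1 : ¬ ((2:Int) ∣ (k + 1)) := by omega
      simp [PySem.List.enumerate, pvPairs, h1]
  | case3 d1 d2 rest ps pm hp ih =>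
      intro k s m hk
      have h1 : PySem.Int.mod (k + 1) 2 = 1 := by
        rw [PySem.Int.mod_eq_emod_of_pos (by omega)]; omega
      have h2 : PySem.Int.mod (k + 1 + 1) 2 = 0 := by
        rw [PySem.Int.mod_eq_emod_of_pos (by omega)]; omega
      have hk2 : (k + 1 + 1) % 2 = 0 := by omega
      simp only [PySem.List.enumerate_cons, List.foldl_cons, h1, h2]
      simp only [show ((1:Int) == 0) = false from rfl, show ((0:Int) == 0) = true from rfl,
        Bool.false_eq_true, if_false, if_true]
      rw [ih (k + 1 + 1) (s + d1) (m * d2) hk2]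
      simp only [pvPairs, hp]
      simp [Prod.ext_iff]
      constructor <;> ring

-- ===== VERDICT (by name: the statement is the Claim_ definition above) =====
theorem calculate_sum_and_multiplication_spec : Claim_equal_calculate_sum_and_multiplication := by
  intro number _ hpre
  unfold Spec_calculate_sum_and_multiplication
  unfold calculate_sum_and_multiplication calculate_sum_and_multiplication_alt
  by_cases hg : number < 0 ∨ PySem.Str.len (PySem.Int.toStr number) < 2
  · rw [if_pos hg, if_pos hg]
  · rw [if_neg hg, if_neg hg]
    rw [pv_fold_eq_pairs _ 0 0 1 (by decide)]
    simp
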